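-- pv_equiv track=rewrite | github.com/rivalxy/gnn-graph-theory | dataset/utils.py | is_paut
-- ===== SOURCE A (Python) =====
-- from typing import TypeAlias
--
-- Mapping: TypeAlias = dict[int, int]
--
-- AdjacencyDict: TypeAlias = dict[int, set[int]]
--
-- def is_injective(mapping: Mapping) -> bool:
--     """Check if the mapping is injective (one-to-one).
--
--     :param mapping: A partial mapping from node indices to node indices.
--     :returns: True if the mapping is injective, False otherwise.
--     """
--     return len(set(mapping.values())) == len(mapping)
--
-- def is_paut(adjacency_dict: AdjacencyDict, mapping: Mapping) -> bool:
--     """Check if mapping is a partial automorphism on given graph.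
--
--     :param adjacency_dict: Adjacency dictionary of the graph.
--     :param mapping: A partial mapping from node indices to node indices.
--     :returns: True if the mapping is a partial automorphism, False otherwise.
--     """
--     if not mapping:
--         return False
--
--     if not is_injective(mapping):
--         return False
--
--     domain = list(mapping.keys())
--     for i, u in enumerate(domain):
--         for v in domain[i + 1 :]:
--             u_mapped = mapping[u]
--             v_mapped = mapping[v]
--             if (v in adjacency_dict.get(u, set())) != (
--                 v_mapped in adjacency_dict.get(u_mapped, set())
--             ):
--                 return False
--     return True
-- ===== SOURCE B (Python) =====
-- def is_injective(mapping):
--     return len(set(mapping.values())) == len(mapping)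
--
--
-- def is_paut(adjacency_dict, mapping):
--     if not mapping or not is_injective(mapping):
--         return False
--     pos = {u: i for i, u in enumerate(mapping)}
--     inv = {w: u for u, w in mapping.items()}
--     fwd = {(u, v)
--            for u in mapping
--            for v in adjacency_dict.get(u, ())
--            if v in pos and pos[v] > pos[u]}
--     img = {(u, inv[w])
--            for u in mapping
--            for w in adjacency_dict.get(mapping[u], ())
--            if w in inv and pos[inv[w]] > pos[u]}
--     return fwd == img
-- ===== Notes on version B (the rewrite author's own statement) =====
-- stated objective: alternative
-- what changed: Replaces A's nested loop over all ordered domain pairs with early return by building, edge-driven, the set of forward domain edge pairs and the set of pairs whose images are edges (pulled back through a precomputed inverse mapping and a position dict), then comparing the two sets once.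
import Mathlib
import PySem

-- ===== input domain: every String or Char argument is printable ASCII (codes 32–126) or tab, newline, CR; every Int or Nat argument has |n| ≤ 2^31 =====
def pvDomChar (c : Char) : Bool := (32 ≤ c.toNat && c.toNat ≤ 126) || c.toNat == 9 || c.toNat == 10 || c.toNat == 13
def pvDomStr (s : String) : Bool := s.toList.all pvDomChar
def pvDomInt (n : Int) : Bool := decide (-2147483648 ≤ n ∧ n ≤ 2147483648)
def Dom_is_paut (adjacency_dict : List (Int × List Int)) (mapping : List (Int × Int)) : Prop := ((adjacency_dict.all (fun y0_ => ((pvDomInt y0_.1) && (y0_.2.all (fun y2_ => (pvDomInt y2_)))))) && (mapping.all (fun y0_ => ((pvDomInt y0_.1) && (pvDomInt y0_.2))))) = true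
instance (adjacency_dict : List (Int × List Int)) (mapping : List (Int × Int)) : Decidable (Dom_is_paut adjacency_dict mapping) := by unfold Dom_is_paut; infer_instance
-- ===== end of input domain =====

-- B replaces A's nested pair loop by an edge-driven comparison of two pair SETS
-- (forward domain edges vs. image edges pulled back through the inverse mapping);
-- objective: alternative algorithm (not measured faster on the generated inputs).

-- ===== PORT A =====
-- helper shared by both Pythons (module-level helper `is_injective`)
def pv_is_injective (mapping : List (Int × Int)) : Bool :=
  let m := PySem.Dict.ofList mapping
  PySem.Set.len (PySem.Set.ofList m.values) == m.size

-- inner `for v in domain[i+1:]` + outer `for i, u in enumerate(domain)` of A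
def pvALoop (adjacency : PySem.Dict Int (List Int)) (m : PySem.Dict Int Int) :
    List Int → Bool
  | [] => true
  | u :: rest =>
      (rest.all (fun v =>
        let u_mapped := m.getD u 0
        let v_mapped := m.getD v 0
        ((adjacency.getD u []).contains v) == ((adjacency.getD u_mapped []).contains v_mapped)))
      && pvALoop adjacency m rest

def is_paut (adjacency_dict : List (Int × List Int)) (mapping : List (Int × Int)) : Bool :=
  let m := PySem.Dict.ofList mapping
  if m.size == 0 then false
  else if !(pv_is_injective mapping) then false
  else pvALoop (PySem.Dict.ofList adjacency_dict) m m.keys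

-- ===== PORT B =====
def is_paut_alt (adjacency_dict : List (Int × List Int)) (mapping : List (Int × Int)) : Bool :=
  let m := PySem.Dict.ofList mapping
  if m.size == 0 || !(pv_is_injective mapping) then false
  else
    let adj := PySem.Dict.ofList adjacency_dict
    -- pos = {u: i for i, u in enumerate(mapping)}
    let pos : PySem.Dict Int Int :=
      (PySem.List.enumerate m.keys).foldl (fun d p => d.insert p.2 p.1) PySem.Dict.empty
    -- inv = {w: u for u, w in mapping.items()}
    let inv : PySem.Dict Int Int :=
      m.items.foldl (fun d p => d.insert p.2 p.1) PySem.Dict.empty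
    -- fwd = {(u, v) for u in mapping for v in adj.get(u, ()) if v in pos and pos[v] > pos[u]}
    let fwd := PySem.Set.ofList (m.keys.flatMap (fun u =>
      (adj.getD u []).filterMap (fun v =>
        if pos.contains v && pos.getD u 0 < pos.getD v 0 then some (u, v) else none)))
    -- img = {(u, inv[w]) for u in mapping for w in adj.get(mapping[u], ()) if w in inv and pos[inv[w]] > pos[u]}
    let img := PySem.Set.ofList (m.keys.flatMap (fun u =>
      (adj.getD (m.getD u 0) []).filterMap (fun w =>
        match inv.get? w with
        | some v => if pos.getD u 0 < pos.getD v 0 then some (u, v) else none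
        | none => none)))
    PySem.Set.equal fwd img

-- ===== PRECONDITION & SPEC =====
def Spec_is_paut (adjacency_dict : List (Int × List Int)) (mapping : List (Int × Int)) (out : Bool) : Prop := out = is_paut_alt adjacency_dict mapping
instance (adjacency_dict : List (Int × List Int)) (mapping : List (Int × Int)) (out : Bool) : Decidable (Spec_is_paut adjacency_dict mapping out) := by unfold Spec_is_paut; infer_instance

-- ===== CLAIM (what is proved, stated in full; the proofs are below) =====
def Claim_equal_is_paut : Prop := ∀ (adjacency_dict : List (Int × List Int)) (mapping : List (Int × Int)), Dom_is_paut adjacency_dict mapping → Spec_is_paut adjacency_dict mapping (is_paut adjacency_dict mapping)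

-- ===== LEMMAS AND PROOFS =====

theorem nodup_of_len_ofList {xs : List Int}
    (h : (PySem.Set.ofList xs).length = xs.length) : xs.Nodup := by
  induction xs with
  | nil => simp
  | cons x xs ih =>
    rw [PySem.Set.ofList_cons] at h
    simp only [List.length_cons, Nat.add_right_cancel_iff] at h
    have h1 : ((PySem.Set.ofList xs).discard x).length ≤ (PySem.Set.ofList xs).length := by
      simp only [PySem.Set.discard]
      exact List.length_filter_le _ _
    have h2 := PySem.Set.length_ofList_le xs
    have hx : x ∉ PySem.Set.ofList xs := by
      intro hx
      have h3 : ((PySem.Set.ofList xs).discard x).length < (PySem.Set.ofList xs).length := by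
        simp only [PySem.Set.discard]
        refine List.length_filter_lt_length_iff_exists.mpr ?_
        exact ⟨x, hx, by simp⟩
      omega
    have hx' : x ∉ xs := by simpa [PySem.Set.mem_ofList] using hx
    have hd : (PySem.Set.ofList xs).discard x = PySem.Set.ofList xs := by
      simp only [PySem.Set.discard]
      refine List.filter_eq_self.mpr ?_
      intro a ha
      have hax : a ≠ x := fun hax => hx (hax ▸ ha)
      simpa using hax
    rw [hd] at h
    exact List.Nodup.cons hx' (ih h)

-- inverse-dict characterisation: inv.get? w = some x  ↔  x is a key mapped to w
theorem inv_get (mapping : List (Int × Int))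
    (hval : ((PySem.Dict.ofList mapping).values).Nodup) (w x : Int) :
    ((PySem.Dict.ofList mapping).items.foldl
      (fun d p => PySem.Dict.insert d p.2 p.1) PySem.Dict.empty).get? w = some x
      ↔ (x ∈ (PySem.Dict.ofList mapping).keys
          ∧ (PySem.Dict.ofList mapping).getD x 0 = w) := by
  set M := PySem.Dict.ofList mapping with hM
  have hknd : M.keys.Nodup := PySem.Dict.nodup_keys_ofList mapping
  have hitems : (M.items.foldl (fun d p => PySem.Dict.insert d p.2 p.1) PySem.Dict.empty).items
      = M.items.map (fun p => (p.2, p.1)) := by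
    have := PySem.Dict.items_foldl_insert_fresh M.items (fun p => p.2) (fun p => p.1)
      PySem.Dict.empty (by intro a _; simp [PySem.Dict.contains_empty]) hval
    simpa using this
  have hinvkeys : (M.items.foldl (fun d p => PySem.Dict.insert d p.2 p.1) PySem.Dict.empty).keys.Nodup := by
    show ((M.items.foldl (fun d p => PySem.Dict.insert d p.2 p.1) PySem.Dict.empty).items.map (·.1)).Nodup
    rw [hitems]
    simpa [Function.comp] using hval
  rw [PySem.Dict.get?_eq_some_iff_mem_items _ _ _ hinvkeys, hitems]
  constructor
  · intro hmem
    rw [List.mem_map] at hmem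
    obtain ⟨p, hp, hpe⟩ := hmem
    obtain ⟨x', w'⟩ := p
    simp only [Prod.mk.injEq] at hpe
    obtain ⟨h2, h1⟩ := hpe
    subst h1
    subst h2
    refine ⟨PySem.Dict.mem_keys_of_mem_items M hp, ?_⟩
    exact PySem.Dict.getD_of_mem_items M hp hknd 0
  · rintro ⟨hk, hg⟩
    rw [List.mem_map]
    refine ⟨(x, M.getD x 0), ?_, by simp [hg]⟩
    rw [PySem.Dict.items_eq_map_keys M hknd 0]
    exact List.mem_map.mpr ⟨x, hk, rfl⟩

-- membership in `enumerate`
theorem mem_enumerate_iff (xs : List Int) (s j u : Int) :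
    (j, u) ∈ PySem.List.enumerate xs s ↔ ∃ i : Nat, xs[i]? = some u ∧ j = s + i := by
  induction xs generalizing s with
  | nil => simp [PySem.List.enumerate_nil]
  | cons x xs ih =>
    rw [PySem.List.enumerate_cons]
    simp only [List.mem_cons, Prod.mk.injEq, ih]
    constructor
    · rintro (⟨h1, h2⟩ | ⟨i, hi, hj⟩)
      · exact ⟨0, by simp [h2], by omega⟩
      · exact ⟨i + 1, by simpa using hi, by push_cast; omega⟩
    · rintro ⟨i, hi, hj⟩
      cases i with
      | zero => left; simp at hi; exact ⟨by omega, hi.symm⟩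
      | succ i => right; exact ⟨i, by simpa using hi, by push_cast at hj ⊢; omega⟩

-- the position dict: keys and values
theorem pos_contains (keys : List Int) (v : Int) :
    ((PySem.List.enumerate keys).foldl (fun d p => PySem.Dict.insert d p.2 p.1)
      PySem.Dict.empty).contains v = true ↔ v ∈ keys := by
  rw [PySem.Dict.contains_iff_mem_keys,
    PySem.Dict.keys_foldl_insert_key (PySem.List.enumerate keys) (·.2) _ PySem.Dict.empty]
  rw [PySem.List.map_snd_enumerate]
  simp [PySem.Dict.keys_empty, PySem.Set.mem_update]

theorem pos_getD (keys : List Int) (hnd : keys.Nodup) (u : Int) (hu : u ∈ keys) :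
    ((PySem.List.enumerate keys).foldl (fun d p => PySem.Dict.insert d p.2 p.1)
      PySem.Dict.empty).getD u 0 = (keys.idxOf u : Int) := by
  have hmapnd : ((PySem.List.enumerate keys).map (·.2)).Nodup := by
    rw [PySem.List.map_snd_enumerate]; exact hnd
  have hitems := PySem.Dict.items_foldl_insert_fresh (PySem.List.enumerate keys)
    (·.2) (·.1) PySem.Dict.empty (by intro a _; simp [PySem.Dict.contains_empty]) hmapnd
  have hknd : ((PySem.List.enumerate keys).foldl (fun d p => PySem.Dict.insert d p.2 p.1)
      PySem.Dict.empty).keys.Nodup :=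
    PySem.Dict.nodup_keys_foldl_insert_key (PySem.List.enumerate keys) (·.2)
      (fun _ p => p.1) PySem.Dict.empty PySem.Dict.nodup_keys_empty
  refine PySem.Dict.getD_of_mem_items _ ?_ hknd 0
  rw [hitems]
  simp only [PySem.Dict.empty, List.nil_append]
  refine List.mem_map.mpr ⟨((keys.idxOf u : Int), u), ?_, rfl⟩
  rw [mem_enumerate_iff]
  refine ⟨keys.idxOf u, ?_, by omega⟩
  rw [List.getElem?_eq_getElem (List.idxOf_lt_length_of_mem hu)]
  simp [List.getElem_idxOf (List.idxOf_lt_length_of_mem hu)]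

-- A's loop is exactly Pairwise of the pair check
theorem pvALoop_iff_pairwise (adj : PySem.Dict Int (List Int)) (m : PySem.Dict Int Int)
    (l : List Int) :
    pvALoop adj m l = true ↔ List.Pairwise (fun u v =>
      ((adj.getD u []).contains v) = ((adj.getD (m.getD u 0) []).contains (m.getD v 0))) l := by
  induction l with
  | nil => simp [pvALoop]
  | cons u rest ih =>
    simp [pvALoop, List.all_eq_true, List.pairwise_cons, ih, and_comm]


-- Pairwise on a Nodup list, phrased through idxOf
theorem pairwise_iff_idxOf {R : Int → Int → Prop} {l : List Int} (hnd : l.Nodup) :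
    l.Pairwise R ↔ ∀ u v, u ∈ l → v ∈ l → l.idxOf u < l.idxOf v → R u v := by
  rw [List.pairwise_iff_getElem]
  constructor
  · intro h u v hu hv hlt
    have hu' := List.idxOf_lt_length_of_mem hu
    have hv' := List.idxOf_lt_length_of_mem hv
    have := h _ _ hu' hv' hlt
    rwa [List.getElem_idxOf, List.getElem_idxOf] at this
  · intro h i j hi hj hij
    apply h _ _ (List.getElem_mem hi) (List.getElem_mem hj)
    rw [List.Nodup.idxOf_getElem hnd i hi, List.Nodup.idxOf_getElem hnd j hj]
    exact hij

-- the bridge: A's pair loop equals B's comparison of the two pair sets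
theorem loop_eq_sets (adj : PySem.Dict Int (List Int)) (m : PySem.Dict Int Int)
    (pos inv : PySem.Dict Int Int)
    (hknd : m.keys.Nodup)
    (hinv : ∀ w x, inv.get? w = some x ↔ (x ∈ m.keys ∧ m.getD x 0 = w))
    (hposc : ∀ v, pos.contains v = true ↔ v ∈ m.keys)
    (hposg : ∀ u, u ∈ m.keys → pos.getD u 0 = (m.keys.idxOf u : Int)) :
    pvALoop adj m m.keys =
      PySem.Set.equal
        (PySem.Set.ofList (m.keys.flatMap (fun u =>
          (adj.getD u []).filterMap (fun v =>
            if pos.contains v && pos.getD u 0 < pos.getD v 0 then some (u, v) else none))))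
        (PySem.Set.ofList (m.keys.flatMap (fun u =>
          (adj.getD (m.getD u 0) []).filterMap (fun w =>
            match inv.get? w with
            | some v => if pos.getD u 0 < pos.getD v 0 then some (u, v) else none
            | none => none)))) := by
  rw [Bool.eq_iff_iff, pvALoop_iff_pairwise, PySem.Set.equal_iff]
  have hmemF : ∀ u v : Int,
      (u, v) ∈ m.keys.flatMap (fun u =>
        (adj.getD u []).filterMap (fun v =>
          if pos.contains v && pos.getD u 0 < pos.getD v 0 then some (u, v) else none))
      ↔ (u ∈ m.keys ∧ v ∈ m.keys ∧ m.keys.idxOf u < m.keys.idxOf v ∧ v ∈ adj.getD u []) := by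
    intro u v
    simp only [List.mem_flatMap, List.mem_filterMap]
    constructor
    · rintro ⟨u0, hu0, v0, hv0, hg⟩
      split_ifs at hg with hc
      · simp only [Option.some.injEq, Prod.mk.injEq] at hg
        obtain ⟨rfl, rfl⟩ := hg
        rw [Bool.and_eq_true] at hc
        obtain ⟨hcv, hlt⟩ := hc
        have hv : v0 ∈ m.keys := (hposc v0).mp hcv
        refine ⟨hu0, hv, ?_, hv0⟩
        rw [hposg u0 hu0, hposg v0 hv] at hlt
        have := of_decide_eq_true hlt
        omega
    · rintro ⟨hu, hv, hlt, hmem⟩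
      refine ⟨u, hu, v, hmem, ?_⟩
      have hc : (pos.contains v && decide (pos.getD u 0 < pos.getD v 0)) = true := by
        rw [Bool.and_eq_true]
        refine ⟨(hposc v).mpr hv, decide_eq_true ?_⟩
        rw [hposg u hu, hposg v hv]
        omega
      rw [if_pos hc]
  have hmemI : ∀ u v : Int,
      (u, v) ∈ m.keys.flatMap (fun u =>
        (adj.getD (m.getD u 0) []).filterMap (fun w =>
          match inv.get? w with
          | some v => if pos.getD u 0 < pos.getD v 0 then some (u, v) else none
          | none => none))
      ↔ (u ∈ m.keys ∧ v ∈ m.keys ∧ m.keys.idxOf u < m.keys.idxOf v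
          ∧ m.getD v 0 ∈ adj.getD (m.getD u 0) []) := by
    intro u v
    simp only [List.mem_flatMap, List.mem_filterMap]
    constructor
    · rintro ⟨u0, hu0, w, hw, hg⟩
      cases hiw : inv.get? w with
      | none => rw [hiw] at hg; cases hg
      | some v0 =>
        rw [hiw] at hg
        have hg' : (if pos.getD u0 0 < pos.getD v0 0 then some (u0, v0) else none)
            = some (u, v) := hg
        split_ifs at hg' with hc
        simp only [Option.some.injEq, Prod.mk.injEq] at hg'
        obtain ⟨rfl, rfl⟩ := hg'
        obtain ⟨hv, hmv⟩ := (hinv w v0).mp hiw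
        refine ⟨hu0, hv, ?_, hmv ▸ hw⟩
        rw [hposg u0 hu0, hposg v0 hv] at hc
        omega
    · rintro ⟨hu, hv, hlt, hmem⟩
      refine ⟨u, hu, m.getD v 0, hmem, ?_⟩
      rw [(hinv (m.getD v 0) v).mpr ⟨hv, rfl⟩]
      have hc : pos.getD u 0 < pos.getD v 0 := by
        rw [hposg u hu, hposg v hv]; omega
      show (if pos.getD u 0 < pos.getD v 0 then some (u, v) else none) = some (u, v)
      rw [if_pos hc]
  constructor
  · intro hpw p
    obtain ⟨u, v⟩ := p
    rw [PySem.Set.mem_ofList, PySem.Set.mem_ofList, hmemF, hmemI]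
    have hR := (pairwise_iff_idxOf hknd).mp hpw
    constructor
    · rintro ⟨hu, hv, hlt, hmem⟩
      have heq := hR u v hu hv hlt
      refine ⟨hu, hv, hlt, ?_⟩
      have : v ∈ adj.getD u [] ↔ m.getD v 0 ∈ adj.getD (m.getD u 0) [] := by
        rw [← List.contains_iff_mem, ← List.contains_iff_mem, heq]
      exact this.mp hmem
    · rintro ⟨hu, hv, hlt, hmem⟩
      have heq := hR u v hu hv hlt
      refine ⟨hu, hv, hlt, ?_⟩
      have : v ∈ adj.getD u [] ↔ m.getD v 0 ∈ adj.getD (m.getD u 0) [] := by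
        rw [← List.contains_iff_mem, ← List.contains_iff_mem, heq]
      exact this.mpr hmem
  · intro hset
    rw [pairwise_iff_idxOf hknd]
    intro u v hu hv hlt
    have h := hset (u, v)
    rw [PySem.Set.mem_ofList, PySem.Set.mem_ofList, hmemF, hmemI] at h
    rw [Bool.eq_iff_iff, List.contains_iff_mem, List.contains_iff_mem]
    constructor
    · intro hmem; exact (h.mp ⟨hu, hv, hlt, hmem⟩).2.2.2
    · intro hmem; exact (h.mpr ⟨hu, hv, hlt, hmem⟩).2.2.2

-- ===== VERDICT (by name: the statement is the Claim_ definition above) =====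
theorem is_paut_spec : Claim_equal_is_paut := by
  intro adjacency_dict mapping _
  unfold Spec_is_paut is_paut is_paut_alt
  by_cases h1 : (PySem.Dict.ofList mapping).size == 0
  · simp [h1]
  · by_cases h2 : pv_is_injective mapping
    · simp only [h1, h2, Bool.not_true, Bool.or_false, if_false, Bool.false_eq_true]
      have hknd : (PySem.Dict.ofList mapping).keys.Nodup := PySem.Dict.nodup_keys_ofList mapping
      have hval : ((PySem.Dict.ofList mapping).values).Nodup := by
        unfold pv_is_injective at h2
        simp only [beq_iff_eq] at h2
        apply nodup_of_len_ofList
        have hsz : (PySem.Dict.ofList mapping).size = ((PySem.Dict.ofList mapping).values).length := by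
          show (PySem.Dict.ofList mapping).items.length = _
          simp [PySem.Dict.values]
        have h2' : ((PySem.Set.ofList (PySem.Dict.ofList mapping).values).length : Int)
            = ((PySem.Dict.ofList mapping).size : Int) := h2
        omega
      exact loop_eq_sets _ _ _ _ hknd (inv_get mapping hval)
        (pos_contains (PySem.Dict.ofList mapping).keys)
        (pos_getD (PySem.Dict.ofList mapping).keys hknd)
    · simp [h1, h2]
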